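-- pv_equiv track=rewrite | github.com/docmisterio/literate-waffle | trivia_rubric.py | _strings_from_stream
-- ===== SOURCE A (Python) =====
-- from typing import Iterable, List, Sequence, Tuple
--
-- def _strings_from_stream(content: str) -> Iterable[str]:
--     """Yield literal strings contained in a single PDF content stream."""
--
--     i = 0
--     length = len(content)
--     while i < length:
--         if content[i] != "(":
--             i += 1
--             continue
--
--         i += 1
--         depth = 1
--         chunk: List[str] = []
--         while i < length and depth > 0:
--             ch = content[i]
--             if ch == "\\" and i + 1 < length:
--                 nxt = content[i + 1]
--                 if nxt in "nrtbf()\\":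
--                     mapping = {
--                         "n": "\n",
--                         "r": "\r",
--                         "t": "\t",
--                         "b": "\b",
--                         "f": "\f",
--                         "(": "(",
--                         ")": ")",
--                         "\\": "\\",
--                     }
--                     chunk.append(mapping.get(nxt, nxt))
--                     i += 2
--                     continue
--                 if "0" <= nxt <= "7":
--                     j = i + 1
--                     oct_digits: List[str] = []
--                     while j < length and len(oct_digits) < 3 and "0" <= content[j] <= "7":
--                         oct_digits.append(content[j])
--                         j += 1
--                     if oct_digits:
--                         chunk.append(chr(int("".join(oct_digits), 8)))
--                         i = j
--                         continue
--                 chunk.append(nxt)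
--                 i += 2
--                 continue
--             if ch == "(":
--                 depth += 1
--                 chunk.append(ch)
--                 i += 1
--                 continue
--             if ch == ")":
--                 depth -= 1
--                 i += 1
--                 if depth == 0:
--                     break
--                 chunk.append(ch)
--                 continue
--             chunk.append(ch)
--             i += 1
--         yield "".join(chunk)
-- ===== SOURCE B (Python) =====
-- # Two-phase rewrite: a tokenizer that finds each top-level (...) body verbatim,
-- # then a separate _decode pass that applies the escape rules.
--
-- ESCAPES = {
--     "n": "\n",
--     "r": "\r",
--     "t": "\t",
--     "b": "\b",
--     "f": "\f",
--     "(": "(",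
--     ")": ")",
--     "\\": "\\",
-- }
--
--
-- def _tokens(content):
--     """Yield the raw (still escaped) bodies of literal strings in content."""
--     i, n = 0, len(content)
--     while i < n:
--         if content[i] != "(":
--             i += 1
--             continue
--         i += 1
--         depth = 1
--         raw = []
--         while i < n:
--             ch = content[i]
--             if ch == "\\" and i + 1 < n:
--                 raw.append(ch)
--                 raw.append(content[i + 1])
--                 i += 2
--                 continue
--             if ch == "(":
--                 depth += 1
--             elif ch == ")":
--                 depth -= 1
--                 if depth == 0:
--                     i += 1
--                     break
--             raw.append(ch)
--             i += 1
--         yield "".join(raw)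
--
--
-- def _decode(raw):
--     """Decode PDF literal-string escapes in a raw token."""
--     out = []
--     i, n = 0, len(raw)
--     while i < n:
--         ch = raw[i]
--         if ch != "\\" or i + 1 == n:
--             out.append(ch)
--             i += 1
--             continue
--         nxt = raw[i + 1]
--         if nxt in ESCAPES:
--             out.append(ESCAPES[nxt])
--             i += 2
--         elif "0" <= nxt <= "7":
--             j = i + 1
--             while j < n and j - i < 4 and "0" <= raw[j] <= "7":
--                 j += 1
--             out.append(chr(int(raw[i + 1:j], 8)))
--             i = j
--         else:
--             out.append(nxt)
--             i += 2
--     return "".join(out)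
--
--
-- def _strings_from_stream(content):
--     for raw in _tokens(content):
--         yield _decode(raw)
-- ===== Notes on version B (the rewrite author's own statement) =====
-- stated objective: alternative
-- what changed: A's single interleaved scan (escape decoding while matching parens) is split into two phases: a tokenizer that extracts each top-level (...) body verbatim (escapes just consume two characters), and a separate _decode pass applying the named/octal escape rules to each raw token.
import Mathlib
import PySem

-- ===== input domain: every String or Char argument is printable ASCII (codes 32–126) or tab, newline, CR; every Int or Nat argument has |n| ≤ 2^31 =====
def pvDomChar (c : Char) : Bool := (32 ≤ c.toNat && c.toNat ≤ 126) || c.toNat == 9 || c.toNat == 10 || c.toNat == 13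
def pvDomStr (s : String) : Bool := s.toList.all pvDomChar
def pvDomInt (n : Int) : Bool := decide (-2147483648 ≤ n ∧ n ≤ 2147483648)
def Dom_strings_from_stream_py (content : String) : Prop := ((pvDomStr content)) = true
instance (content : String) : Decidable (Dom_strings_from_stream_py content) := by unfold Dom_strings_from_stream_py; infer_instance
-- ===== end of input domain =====

-- B re-decomposes A's single decoding scan into two phases (a verbatim tokenizer for
-- top-level (...) bodies, then a separate escape decoder); objective: alternative, not faster.
-- While loops are ported with a fuel parameter (= the number of characters still scannable,
-- which bounds the remaining iterations); the fuel-exhausted arms are unreachable.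

-- Shared helpers (the escape table and octal scanning both Python sources contain literally).
-- "0" <= c <= "7"
def pvIsOct (c : Char) : Bool := '0' ≤ c && c ≤ '7'

-- the while loop collecting at most `n` octal digits from the front of a list
def pvTakeOct : List Char → Nat → List Char
  | _, 0 => []
  | [], _ + 1 => []
  | c :: t, n + 1 => if pvIsOct c then c :: pvTakeOct t n else []

-- int("".join(ds), 8)
def pvOctVal (ds : List Char) : Nat := ds.foldl (fun a c => a * 8 + (c.toNat - 48)) 0

-- the mapping {"n": "\n", ...}; '(' ')' '\\' map to themselves
def pvEscMap (c : Char) : Char :=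
  if c = 'n' then Char.ofNat 10
  else if c = 'r' then Char.ofNat 13
  else if c = 't' then Char.ofNat 9
  else if c = 'b' then Char.ofNat 8
  else if c = 'f' then Char.ofNat 12
  else c

-- ===== PORT A =====
-- A's inner while loop: state (remaining chars, depth, chunk); returns (chunk, remaining).
-- The `| _, s, 0, chunk` arm is the `depth > 0` part of A's while condition.
def pvInnerA : Nat → List Char → Nat → List Char → List Char × List Char
  | _, s, 0, chunk => (chunk, s)
  | _, [], _ + 1, chunk => (chunk, [])
  | 0, s, _ + 1, chunk => (chunk, s)
  | fuel + 1, ch :: rest, d + 1, chunk =>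
    if h : ch = '\\' ∧ rest ≠ [] then
      let nxt := rest.head h.2
      if nxt ∈ ['n', 'r', 't', 'b', 'f', '(', ')', '\\'] then
        pvInnerA fuel rest.tail (d + 1) (chunk ++ [pvEscMap nxt])
      else if pvIsOct nxt then
        let digits := pvTakeOct rest 3
        if digits ≠ [] then
          pvInnerA fuel (rest.drop digits.length) (d + 1) (chunk ++ [Char.ofNat (pvOctVal digits)])
        else
          pvInnerA fuel rest.tail (d + 1) (chunk ++ [nxt])
      else
        pvInnerA fuel rest.tail (d + 1) (chunk ++ [nxt])
    else if ch = '(' then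
      pvInnerA fuel rest (d + 2) (chunk ++ [ch])
    else if ch = ')' then
      if d = 0 then (chunk, rest) else pvInnerA fuel rest d (chunk ++ [ch])
    else
      pvInnerA fuel rest (d + 1) (chunk ++ [ch])

-- A's outer while loop
def pvOuterA : Nat → List Char → List String
  | _, [] => []
  | 0, _ => []
  | fuel + 1, ch :: rest =>
    if ch = '(' then
      let p := pvInnerA rest.length rest 1 []
      String.ofList p.1 :: pvOuterA fuel p.2
    else pvOuterA fuel rest

def strings_from_stream_py (content : String) : List String :=
  pvOuterA content.toList.length content.toList

-- ===== PORT B =====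
-- B's tokenizer inner loop: collects the raw body verbatim (escapes consume two chars).
def pvGrab : Nat → List Char → Nat → List Char → List Char × List Char
  | _, [], _, raw => (raw, [])
  | 0, s, _, raw => (raw, s)
  | fuel + 1, ch :: rest, d, raw =>
    if h : ch = '\\' ∧ rest ≠ [] then
      pvGrab fuel rest.tail d (raw ++ [ch, rest.head h.2])
    else if ch = '(' then
      pvGrab fuel rest (d + 1) (raw ++ [ch])
    else if ch = ')' then
      if d = 1 then (raw, rest) else pvGrab fuel rest (d - 1) (raw ++ [ch])
    else
      pvGrab fuel rest d (raw ++ [ch])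

-- B's tokenizer outer loop (_tokens)
def pvTok : Nat → List Char → List (List Char)
  | _, [] => []
  | 0, _ => []
  | fuel + 1, ch :: rest =>
    if ch = '(' then
      let p := pvGrab rest.length rest 1 []
      p.1 :: pvTok fuel p.2
    else pvTok fuel rest

-- B's _decode
def pvDecode : Nat → List Char → List Char
  | _, [] => []
  | 0, _ => []
  | fuel + 1, ch :: rest =>
    if h : ch = '\\' ∧ rest ≠ [] then
      let nxt := rest.head h.2
      if nxt ∈ ['n', 'r', 't', 'b', 'f', '(', ')', '\\'] then
        pvEscMap nxt :: pvDecode fuel rest.tail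
      else if pvIsOct nxt then
        let digits := pvTakeOct rest 3
        Char.ofNat (pvOctVal digits) :: pvDecode fuel (rest.drop digits.length)
      else
        nxt :: pvDecode fuel rest.tail
    else
      ch :: pvDecode fuel rest

def strings_from_stream_py_alt (content : String) : List String :=
  (pvTok content.toList.length content.toList).map
    (fun raw => String.ofList (pvDecode raw.length raw))

-- ===== PRECONDITION & SPEC =====
def Spec_strings_from_stream_py (content : String) (out : List String) : Prop := out = strings_from_stream_py_alt content
instance (content : String) (out : List String) : Decidable (Spec_strings_from_stream_py content out) := by unfold Spec_strings_from_stream_py; infer_instance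

-- ===== CLAIM (what is proved, stated in full; the proofs are below) =====
def Claim_equal_strings_from_stream_py : Prop := ∀ (content : String), Dom_strings_from_stream_py content → Spec_strings_from_stream_py content (strings_from_stream_py content)

-- ===== LEMMAS AND PROOFS =====

lemma oct_ne (c : Char) (h : pvIsOct c = true) :
    c ≠ '\\' ∧ c ≠ '(' ∧ c ≠ ')' ∧ c ∉ ['n', 'r', 't', 'b', 'f', '(', ')', '\\'] := by
  refine ⟨?_, ?_, ?_, ?_⟩
  · rintro rfl; exact absurd h (by decide)
  · rintro rfl; exact absurd h (by decide)
  · rintro rfl; exact absurd h (by decide)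
  · intro hm
    simp only [List.mem_cons, List.not_mem_nil, or_false] at hm
    rcases hm with rfl | rfl | rfl | rfl | rfl | rfl | rfl | rfl <;> exact absurd h (by decide)

def pvNotOctHead : List Char → Prop
  | [] => True
  | c :: _ => pvIsOct c = false

lemma takeOct_prefix : ∀ (xs : List Char) (n : Nat),
    pvTakeOct xs n ++ xs.drop (pvTakeOct xs n).length = xs := by
  intro xs
  induction xs with
  | nil => intro n; cases n <;> simp [pvTakeOct]
  | cons c t ih =>
    intro n; cases n with
    | zero => simp [pvTakeOct]
    | succ m =>
      simp only [pvTakeOct]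
      by_cases hc : pvIsOct c = true
      · simp [hc, ih m]
      · simp [hc]

lemma takeOct_all_oct : ∀ (xs : List Char) (n : Nat) (c : Char),
    c ∈ pvTakeOct xs n → pvIsOct c = true := by
  intro xs
  induction xs with
  | nil => intro n c h; cases n <;> simp [pvTakeOct] at h
  | cons a t ih =>
    intro n c h; cases n with
    | zero => simp [pvTakeOct] at h
    | succ m =>
      simp only [pvTakeOct] at h
      by_cases ha : pvIsOct a = true
      · simp [ha] at h; rcases h with rfl | h
        · exact ha
        · exact ih m c h
      · simp [ha] at h

lemma takeOct_len_le : ∀ (xs : List Char) (n : Nat), (pvTakeOct xs n).length ≤ n := by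
  intro xs
  induction xs with
  | nil => intro n; cases n <;> simp [pvTakeOct]
  | cons a t ih =>
    intro n; cases n with
    | zero => simp [pvTakeOct]
    | succ m =>
      simp only [pvTakeOct]
      by_cases ha : pvIsOct a = true
      · simp [ha]; exact ih m
      · simp [ha]

lemma takeOct_stop : ∀ (xs : List Char) (n : Nat),
    (pvTakeOct xs n).length < n → pvNotOctHead (xs.drop (pvTakeOct xs n).length) := by
  intro xs
  induction xs with
  | nil => intro n h; cases n <;> simp [pvTakeOct, pvNotOctHead]
  | cons a t ih =>
    intro n h; cases n with
    | zero => simp at h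
    | succ m =>
      by_cases ha : pvIsOct a = true
      · simp only [pvTakeOct, ha, if_true, List.length_cons, List.drop_succ_cons] at h ⊢
        exact ih m (by omega)
      · simp [pvTakeOct, ha, pvNotOctHead]

lemma takeOct_nil_of_notOctHead : ∀ (xs : List Char) (n : Nat),
    pvNotOctHead xs → pvTakeOct xs n = [] := by
  intro xs n h
  cases xs with
  | nil => cases n <;> simp [pvTakeOct]
  | cons a t => cases n with
    | zero => simp [pvTakeOct]
    | succ m => simp only [pvTakeOct]; simp [pvNotOctHead] at h; simp [h]

lemma takeOct_append : ∀ (ds ys : List Char) (n : Nat),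
    (∀ c ∈ ds, pvIsOct c = true) → ds.length ≤ n →
    pvTakeOct (ds ++ ys) n = ds ++ pvTakeOct ys (n - ds.length) := by
  intro ds
  induction ds with
  | nil => intro ys n _ _; simp
  | cons a t ih =>
    intro ys n hall hlen
    cases n with
    | zero => simp at hlen
    | succ m =>
      have ha : pvIsOct a = true := hall a (by simp)
      simp only [List.cons_append, pvTakeOct, ha, if_true]
      rw [ih ys m (fun c hc => hall c (by simp [hc])) (by simpa using hlen)]
      simp [Nat.succ_sub_succ]

lemma grab_acc : ∀ (f : Nat) (s : List Char) (d : Nat) (raw : List Char),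
    pvGrab f s d raw = (raw ++ (pvGrab f s d []).1, (pvGrab f s d []).2) := by
  intro f
  induction f with
  | zero =>
    intro s d raw
    cases s <;> simp [pvGrab]
  | succ m ih =>
    intro s d raw
    cases s with
    | nil => simp [pvGrab]
    | cons ch rest =>
      rw [pvGrab, pvGrab]
      by_cases h : ch = '\\' ∧ rest ≠ []
      · rw [dif_pos h, dif_pos h]
        rw [ih rest.tail d (raw ++ [ch, rest.head h.2]),
            ih rest.tail d ([] ++ [ch, rest.head h.2])]
        simp
      · rw [dif_neg h, dif_neg h]
        by_cases h1 : ch = '('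
        · simp only [if_pos h1]
          rw [ih rest (d + 1) (raw ++ [ch]), ih rest (d + 1) ([] ++ [ch])]
          simp
        · simp only [if_neg h1]
          by_cases h2 : ch = ')'
          · simp only [if_pos h2]
            by_cases h3 : d = 1
            · simp [h3]
            · simp only [if_neg h3]
              rw [ih rest (d - 1) (raw ++ [ch]), ih rest (d - 1) ([] ++ [ch])]
              simp
          · simp only [if_neg h2]
            rw [ih rest d (raw ++ [ch]), ih rest d ([] ++ [ch])]
            simp

lemma grab_digits : ∀ (ds : List Char), (∀ c ∈ ds, pvIsOct c = true) →
    ∀ (f : Nat) (t : List Char) (d : Nat) (raw : List Char),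
    pvGrab (ds.length + f) (ds ++ t) d raw = pvGrab f t d (raw ++ ds) := by
  intro ds
  induction ds with
  | nil => intro _ f t d raw; simp
  | cons a ds' ih =>
    intro hall f t d raw
    obtain ⟨ne1, ne2, ne3, _⟩ := oct_ne a (hall a (by simp))
    have hlen : (a :: ds').length + f = (ds'.length + f) + 1 := by simp; omega
    rw [hlen, List.cons_append, pvGrab]
    rw [dif_neg (by simp [ne1])]
    rw [if_neg ne2, if_neg ne3]
    rw [ih (fun c hc => hall c (by simp [hc])) f t d (raw ++ [a])]
    simp

lemma grab_head : ∀ (f : Nat) (s : List Char) (d : Nat),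
    pvNotOctHead s → pvNotOctHead (pvGrab f s d []).1 := by
  intro f s d hs
  cases s with
  | nil => cases f <;> simp [pvGrab, pvNotOctHead]
  | cons ch rest =>
    cases f with
    | zero => simp [pvGrab, pvNotOctHead]
    | succ m =>
      have hch : pvIsOct ch = false := hs
      rw [pvGrab]
      by_cases h : ch = '\\' ∧ rest ≠ []
      · rw [dif_pos h]
        rw [grab_acc m rest.tail d ([] ++ [ch, rest.head h.2])]
        simp [pvNotOctHead, h.1]
        decide
      · rw [dif_neg h]
        by_cases h1 : ch = '('
        · simp only [if_pos h1]
          rw [grab_acc m rest (d + 1) ([] ++ [ch])]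
          simpa [pvNotOctHead] using hch
        · simp only [if_neg h1]
          by_cases h2 : ch = ')'
          · simp only [if_pos h2]
            by_cases h3 : d = 1
            · simp [h3, pvNotOctHead]
            · simp only [if_neg h3]
              rw [grab_acc m rest (d - 1) ([] ++ [ch])]
              simpa [pvNotOctHead] using hch
          · simp only [if_neg h2]
            rw [grab_acc m rest d ([] ++ [ch])]
            simpa [pvNotOctHead] using hch

lemma grab_snd_le : ∀ (f : Nat) (s : List Char) (d : Nat) (raw : List Char),
    (pvGrab f s d raw).2.length ≤ s.length := by
  intro f s d raw
  fun_induction pvGrab f s d raw <;> simp_all [List.length_tail] <;> omega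

lemma inner_eq : ∀ (fA : Nat) (s : List Char), s.length ≤ fA →
    ∀ (d : Nat) (chunk : List Char) (fB : Nat), s.length ≤ fB →
    ∀ (fD : Nat), (pvGrab fB s (d + 1) []).1.length ≤ fD →
    pvInnerA fA s (d + 1) chunk =
      (chunk ++ pvDecode fD (pvGrab fB s (d + 1) []).1, (pvGrab fB s (d + 1) []).2) := by
  intro fA
  induction fA with
  | zero =>
    intro s hs d chunk fB _ fD _
    have : s = [] := List.length_eq_zero_iff.mp (by omega)
    subst this
    cases fB <;> cases fD <;> simp [pvInnerA, pvGrab, pvDecode]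
  | succ m ih =>
    intro s hs d chunk fB hsB fD hfD
    cases s with
    | nil => cases fB <;> cases fD <;> simp [pvInnerA, pvGrab, pvDecode]
    | cons ch rest =>
      simp only [List.length_cons] at hs hsB
      obtain ⟨g, rfl⟩ : ∃ g, fB = g + 1 := ⟨fB - 1, by omega⟩
      rw [pvInnerA, pvGrab]
      rw [pvGrab] at hfD
      by_cases h : ch = '\\' ∧ rest ≠ []
      · rw [dif_pos h, dif_pos h]
        rw [dif_pos h] at hfD
        obtain ⟨hc, hne⟩ := h
        subst hc
        cases rest with
        | nil => exact absurd rfl hne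
        | cons nxt rest'' =>
          simp only [List.head_cons, List.tail_cons, List.length_cons] at *
          by_cases hn : nxt ∈ ['n', 'r', 't', 'b', 'f', '(', ')', '\\']
          · rw [if_pos hn]
            rw [grab_acc g rest'' (d + 1) ([] ++ ['\\', nxt])] at hfD ⊢
            simp only [List.nil_append, List.cons_append, List.length_cons] at hfD ⊢
            obtain ⟨e, rfl⟩ : ∃ e, fD = e + 1 := ⟨fD - 1, by omega⟩
            rw [pvDecode]
            rw [dif_pos ⟨rfl, by simp⟩]
            simp only [List.head_cons, List.tail_cons]
            rw [if_pos hn]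
            rw [ih rest'' (by omega) d (chunk ++ [pvEscMap nxt]) g (by omega) e (by omega)]
            simp
          · rw [if_neg hn]
            by_cases ho : pvIsOct nxt = true
            · rw [if_pos ho]
              -- octal escape
              have hdig : pvTakeOct (nxt :: rest'') 3 = nxt :: pvTakeOct rest'' 2 := by
                simp [pvTakeOct, ho]
              set ds := pvTakeOct rest'' 2 with hds
              have hds_oct : ∀ c ∈ ds, pvIsOct c = true := fun c hc => takeOct_all_oct rest'' 2 c hc
              have hlen2 : ds.length ≤ 2 := takeOct_len_le rest'' 2
              have hsplit : ds ++ rest''.drop ds.length = rest'' := takeOct_prefix rest'' 2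
              set rest3 := rest''.drop ds.length with hrest3
              have hlds : ds.length + rest3.length = rest''.length := by
                conv_rhs => rw [← hsplit]
                simp
              set C := Char.ofNat (pvOctVal (nxt :: ds)) with hC
              rw [hdig]
              rw [if_pos (by simp : (nxt :: ds) ≠ [])]
              obtain ⟨g2, rfl⟩ : ∃ g2, g = ds.length + g2 := ⟨g - ds.length, by omega⟩
              -- the B-side grab result
              have hB : pvGrab (ds.length + g2) rest'' (d + 1) ([] ++ ['\\', nxt]) =
                  (['\\', nxt] ++ ds ++ (pvGrab g2 rest3 (d + 1) []).1, (pvGrab g2 rest3 (d + 1) []).2) := by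
                conv_lhs => rw [← hsplit]
                rw [grab_digits ds hds_oct g2 rest3 (d + 1) ([] ++ ['\\', nxt])]
                rw [grab_acc g2 rest3 (d + 1) ([] ++ ['\\', nxt] ++ ds)]
                simp
              rw [hB] at hfD ⊢
              -- leftover budget of the decode-side octal scan is empty
              have hz : pvTakeOct (pvGrab g2 rest3 (d + 1) []).1 (2 - ds.length) = [] := by
                rcases Nat.lt_or_ge ds.length 2 with hlt | hge
                · have h1 : pvNotOctHead rest3 := takeOct_stop rest'' 2 hlt
                  have h2 : pvNotOctHead (pvGrab g2 rest3 (d + 1) []).1 := grab_head g2 rest3 (d + 1) h1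
                  exact takeOct_nil_of_notOctHead _ _ h2
                · have : 2 - ds.length = 0 := by omega
                  rw [this]
                  cases (pvGrab g2 rest3 (d + 1) []).1 <;> simp [pvTakeOct]
              simp only [List.cons_append, List.nil_append, List.length_cons, List.length_append] at hfD ⊢
              obtain ⟨e, rfl⟩ : ∃ e, fD = e + 1 := ⟨fD - 1, by omega⟩
              -- decoding the raw token
              have hdec : pvDecode (e + 1) ('\\' :: nxt :: (ds ++ (pvGrab g2 rest3 (d + 1) []).1)) =
                  C :: pvDecode e (pvGrab g2 rest3 (d + 1) []).1 := by
                rw [pvDecode]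
                rw [dif_pos ⟨rfl, by simp⟩]
                simp only [List.head_cons, List.tail_cons]
                rw [if_neg hn, if_pos ho]
                have e1 : pvTakeOct (nxt :: (ds ++ (pvGrab g2 rest3 (d + 1) []).1)) 3 =
                    nxt :: ds := by
                  simp only [pvTakeOct, ho, if_true]
                  rw [takeOct_append ds _ 2 hds_oct hlen2, hz]
                  simp
                rw [e1]
                simp [hC]
              rw [hdec]
              -- the A side continues on rest3
              have hdrop : List.drop (ds.length + 1) (nxt :: rest'') = rest3 := by
                simp [hrest3]
              rw [hdrop]
              rw [ih rest3 (by omega) d (chunk ++ [C]) g2 (by omega) e (by omega)]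
              simp
            · rw [if_neg ho]
              rw [grab_acc g rest'' (d + 1) ([] ++ ['\\', nxt])] at hfD ⊢
              simp only [List.nil_append, List.cons_append, List.length_cons] at hfD ⊢
              obtain ⟨e, rfl⟩ : ∃ e, fD = e + 1 := ⟨fD - 1, by omega⟩
              rw [pvDecode]
              rw [dif_pos ⟨rfl, by simp⟩]
              simp only [List.head_cons, List.tail_cons]
              rw [if_neg hn, if_neg ho]
              rw [ih rest'' (by omega) d (chunk ++ [nxt]) g (by omega) e (by omega)]
              simp
      · rw [dif_neg h, dif_neg h]
        rw [dif_neg h] at hfD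
        by_cases h1 : ch = '('
        · rw [if_pos h1, if_pos h1]
          rw [if_pos h1] at hfD
          rw [grab_acc g rest (d + 1 + 1) ([] ++ [ch])] at hfD ⊢
          simp only [List.nil_append, List.cons_append, List.length_cons] at hfD ⊢
          obtain ⟨e, rfl⟩ : ∃ e, fD = e + 1 := ⟨fD - 1, by omega⟩
          have hdec : pvDecode (e + 1) (ch :: (pvGrab g rest (d + 1 + 1) []).1) =
              ch :: pvDecode e (pvGrab g rest (d + 1 + 1) []).1 := by
            rw [pvDecode]
            rw [dif_neg (by simp [h1])]
          rw [hdec]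
          rw [ih rest (by omega) (d + 1) (chunk ++ [ch]) g (by omega) e (by omega)]
          simp
        · rw [if_neg h1, if_neg h1]
          rw [if_neg h1] at hfD
          by_cases h2 : ch = ')'
          · rw [if_pos h2, if_pos h2]
            rw [if_pos h2] at hfD
            by_cases h3 : d = 0
            · subst h3
              rw [if_pos rfl, if_pos rfl]
              cases fD <;> simp [pvDecode]
            · rw [if_neg h3, if_neg (by omega : ¬ d + 1 = 1)]
              rw [if_neg (by omega : ¬ d + 1 = 1)] at hfD
              rw [grab_acc g rest (d + 1 - 1) ([] ++ [ch])] at hfD ⊢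
              have hd1 : d + 1 - 1 = d := by omega
              rw [hd1] at hfD ⊢
              simp only [List.nil_append, List.cons_append, List.length_cons] at hfD ⊢
              obtain ⟨e, rfl⟩ : ∃ e, fD = e + 1 := ⟨fD - 1, by omega⟩
              have hdec : pvDecode (e + 1) (ch :: (pvGrab g rest d []).1) =
                  ch :: pvDecode e (pvGrab g rest d []).1 := by
                rw [pvDecode]
                rw [dif_neg (by simp [h2])]
              rw [hdec]
              obtain ⟨d', rfl⟩ : ∃ d', d = d' + 1 := ⟨d - 1, by omega⟩
              rw [ih rest (by omega) d' (chunk ++ [ch]) g (by omega) e (by omega)]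
              simp
          · rw [if_neg h2, if_neg h2]
            rw [if_neg h2] at hfD
            rw [grab_acc g rest (d + 1) ([] ++ [ch])] at hfD ⊢
            simp only [List.nil_append, List.cons_append, List.length_cons] at hfD ⊢
            obtain ⟨e, rfl⟩ : ∃ e, fD = e + 1 := ⟨fD - 1, by omega⟩
            have hdec : pvDecode (e + 1) (ch :: (pvGrab g rest (d + 1) []).1) =
                ch :: pvDecode e (pvGrab g rest (d + 1) []).1 := by
              rw [pvDecode]
              by_cases hbs : ch = '\\'
              · have hrest : rest = [] := by
                  by_contra hne
                  exact h ⟨hbs, hne⟩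
                subst hrest
                rw [dif_neg (by cases g <;> simp [pvGrab])]
              · rw [dif_neg (by simp [hbs])]
            rw [hdec]
            rw [ih rest (by omega) d (chunk ++ [ch]) g (by omega) e (by omega)]
            simp

lemma outer_eq : ∀ (fO : Nat) (s : List Char), s.length ≤ fO →
    ∀ (fT : Nat), s.length ≤ fT →
    pvOuterA fO s = (pvTok fT s).map (fun raw => String.ofList (pvDecode raw.length raw)) := by
  intro fO
  induction fO with
  | zero =>
    intro s hs fT _
    have : s = [] := List.length_eq_zero_iff.mp (by omega)
    subst this
    cases fT <;> simp [pvOuterA, pvTok]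
  | succ m ih =>
    intro s hs fT hsT
    cases s with
    | nil => cases fT <;> simp [pvOuterA, pvTok]
    | cons ch rest =>
      simp only [List.length_cons] at hs hsT
      obtain ⟨t, rfl⟩ : ∃ t, fT = t + 1 := ⟨fT - 1, by omega⟩
      rw [pvOuterA, pvTok]
      by_cases hc : ch = '('
      · simp only [if_pos hc]
        have hi := inner_eq rest.length rest le_rfl 0 [] rest.length le_rfl
            (pvGrab rest.length rest 1 []).1.length le_rfl
        simp only [Nat.zero_add, List.nil_append] at hi
        rw [hi]
        have hle := grab_snd_le rest.length rest 1 []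
        rw [ih (pvGrab rest.length rest 1 []).2 (by omega) t (by omega)]
        simp
      · simp only [if_neg hc]
        exact ih rest (by omega) t (by omega)

-- ===== VERDICT (by name: the statement is the Claim_ definition above) =====
theorem strings_from_stream_py_spec : Claim_equal_strings_from_stream_py := by
  intro content _
  unfold Spec_strings_from_stream_py strings_from_stream_py strings_from_stream_py_alt
  exact outer_eq content.toList.length content.toList le_rfl content.toList.length le_rfl
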